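-- pv_equiv track=rewrite | github.com/VerifiableRobotics/LTL_stack | rqt_grounding_and_analysis/src/rqt_grounding_and_analysis/mapping_and_analysis_module.py | get_ltl_suggestion
-- ===== SOURCE A (Python) =====
-- import copy
--
-- def get_ltl_suggestion(output_full_list):
--     full_ltl_list = []
--     for idx, otuput_prop in enumerate(output_full_list):
--         temp_list = copy.deepcopy(output_full_list)
--         temp_list[idx] = "not "+temp_list[idx]
--         full_ltl_list.append(temp_list)
--
--     # everything can be false
--     temp_list = copy.deepcopy(output_full_list)
--     temp_list = ["not "+x for x in temp_list]
--     full_ltl_list.append(temp_list)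
--
--     # form ltl string
--     structured_eng_str = "always ("+ " or ".join("("+" and ".join(prop for prop in prop_list)+")" for prop_list in full_ltl_list)+")"
--     ltl_str = "[] ("+ " | ".join("("+" & ".join(prop.replace('not', '!') for prop in prop_list)+")" for prop_list in full_ltl_list)+")"
--
--     return structured_eng_str, ltl_str
-- ===== SOURCE B (Python) =====
-- def get_ltl_suggestion(output_full_list):
--     # Shared-join construction: prefix/suffix accumulators make each clause a
--     # concatenation of three precomputed pieces instead of a per-clause join.
--     def assemble(head, csep, osep, pos, neg):
--         n = len(pos)
--         pref = [""]
--         acc = ""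
--         for p in pos:
--             acc = acc + p + csep
--             pref.append(acc)
--         suf = [""]
--         acc = ""
--         for p in reversed(pos):
--             acc = csep + p + acc
--             suf.append(acc)
--         suf.reverse()
--         clauses = ["(" + pref[i] + neg[i] + suf[i + 1] + ")" for i in range(n)]
--         clauses.append("(" + csep.join(neg) + ")")
--         return head + osep.join(clauses) + ")"
--
--     pos = list(output_full_list)
--     neg = ["not " + p for p in pos]
--     posR = [p.replace('not', '!') for p in pos]
--     negR = [q.replace('not', '!') for q in neg]
--     return (assemble("always (", " and ", " or ", pos, neg),
--             assemble("[] (", " & ", " | ", posR, negR))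
-- ===== Notes on version B (the rewrite author's own statement) =====
-- stated objective: alternative
-- what changed: B drops A's deepcopy-built list-of-lists and its n+1 independent ' and '-joins: two accumulator passes precompute shared prefix strings pref[i] and suffix strings suf[i], and clause i is assembled as the concatenation pref[i]+neg[i]+suf[i+1]; the LTL variant comes from one replace pass over the props instead of replacing inside every clause.
import Mathlib
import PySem

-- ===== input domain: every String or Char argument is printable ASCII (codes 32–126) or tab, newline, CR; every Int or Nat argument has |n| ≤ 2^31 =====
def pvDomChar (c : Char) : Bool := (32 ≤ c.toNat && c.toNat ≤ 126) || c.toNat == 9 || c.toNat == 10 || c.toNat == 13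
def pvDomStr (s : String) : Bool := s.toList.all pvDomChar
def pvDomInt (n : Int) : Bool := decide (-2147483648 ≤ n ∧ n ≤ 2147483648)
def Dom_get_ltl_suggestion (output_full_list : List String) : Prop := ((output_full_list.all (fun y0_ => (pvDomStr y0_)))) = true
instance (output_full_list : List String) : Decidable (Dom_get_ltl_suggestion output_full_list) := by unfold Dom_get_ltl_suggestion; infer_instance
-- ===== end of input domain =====

-- B replaces A's deepcopy list-of-lists and per-clause joins by prefix/suffix concatenation
-- accumulators: clause i is assembled from three precomputed pieces pref[i], neg[i], suf[i+1];
-- objective: alternative (shared joins instead of n+1 independent joins).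

-- ===== PORT A =====
def get_ltl_suggestion (output_full_list : List String) : String × String :=
  let full_ltl_list : List (List String) :=
    (PySem.List.enumerate output_full_list).foldl
      (fun acc p => acc ++ [PySem.List.pySetD output_full_list p.1 ("not " ++ p.2)]) []
  let full_ltl_list := full_ltl_list ++ [output_full_list.map (fun x => "not " ++ x)]
  let structured_eng_str := "always (" ++ PySem.Str.join " or "
      (full_ltl_list.map (fun prop_list => "(" ++ PySem.Str.join " and " prop_list ++ ")")) ++ ")"
  let ltl_str := "[] (" ++ PySem.Str.join " | "
      (full_ltl_list.map (fun prop_list => "(" ++ PySem.Str.join " & "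
        (prop_list.map (fun prop => PySem.Str.replace prop "not" "!")) ++ ")")) ++ ")"
  (structured_eng_str, ltl_str)

-- ===== PORT B =====
-- B's helper `assemble(head, csep, osep, pos, neg)`: two accumulator passes build the
-- prefix list (pref) and, over reversed(pos), the suffix list (suf, then reversed);
-- clause i is "(" + pref[i] + neg[i] + suf[i+1] + ")".
def pvAssemble (head csep osep : String) (pos neg : List String) : String :=
  let n : Int := (pos.length : Int)
  let pr := pos.foldl (fun (st : List String × String) p =>
      (st.1 ++ [st.2 ++ p ++ csep], st.2 ++ p ++ csep)) ([""], "")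
  let pref := pr.1
  let sf := pos.reverse.foldl (fun (st : List String × String) p =>
      (st.1 ++ [csep ++ p ++ st.2], csep ++ p ++ st.2)) ([""], "")
  let suf := sf.1.reverse
  let clauses := (PySem.List.pyRange 0 n 1).map (fun i =>
      "(" ++ PySem.List.pyGetD pref i "" ++ PySem.List.pyGetD neg i ""
          ++ PySem.List.pyGetD suf (i + 1) "" ++ ")")
  let clauses := clauses ++ ["(" ++ PySem.Str.join csep neg ++ ")"]
  head ++ PySem.Str.join osep clauses ++ ")"

def get_ltl_suggestion_alt (output_full_list : List String) : String × String :=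
  let pos := output_full_list
  let neg := pos.map (fun p => "not " ++ p)
  let posR := pos.map (fun p => PySem.Str.replace p "not" "!")
  let negR := neg.map (fun q => PySem.Str.replace q "not" "!")
  (pvAssemble "always (" " and " " or " pos neg,
   pvAssemble "[] (" " & " " | " posR negR)

-- ===== PRECONDITION & SPEC =====
def Spec_get_ltl_suggestion (output_full_list : List String) (out : String × String) : Prop := out = get_ltl_suggestion_alt output_full_list
instance (output_full_list : List String) (out : String × String) : Decidable (Spec_get_ltl_suggestion output_full_list out) := by unfold Spec_get_ltl_suggestion; infer_instance

-- ===== CLAIM (what is proved, stated in full; the proofs are below) =====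
def Claim_equal_get_ltl_suggestion : Prop := ∀ (output_full_list : List String), Dom_get_ltl_suggestion output_full_list → Spec_get_ltl_suggestion output_full_list (get_ltl_suggestion output_full_list)

-- ===== LEMMAS AND PROOFS =====

-- "p0 sep p1 sep … p(k-1) sep"  (every element followed by sep)
def pvCatL (sep : String) : List String → String
  | [] => ""
  | p :: r => p ++ sep ++ pvCatL sep r

-- "sep p0 sep p1 … sep p(k-1)"  (every element preceded by sep)
def pvCatR (sep : String) : List String → String
  | [] => ""
  | p :: r => sep ++ p ++ pvCatR sep r

theorem pvCatR_append_singleton (sep p : String) (l : List String) :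
    pvCatR sep (l ++ [p]) = pvCatR sep l ++ sep ++ p := by
  induction l with
  | nil => simp [pvCatR, String.append_empty, String.empty_append]
  | cons a t ih => simp [pvCatR, ih, String.append_assoc]

theorem pvJoin_cons (sep y : String) (ys : List String) :
    PySem.Str.join sep (y :: ys) = y ++ pvCatR sep ys := by
  induction ys generalizing y with
  | nil => simp [PySem.Str.join, PySem.Chars.join_singleton, pvCatR, String.append_empty]
  | cons z t ih =>
      rw [show PySem.Str.join sep (y :: z :: t) = y ++ sep ++ PySem.Str.join sep (z :: t) by
        simp [PySem.Str.join, PySem.Chars.join_cons_cons, String.ofList_append, String.append_assoc]]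
      simp [ih, pvCatR, String.append_assoc]

theorem pvCatR_append_cons (sep y : String) (t ys : List String) :
    pvCatR sep (t ++ y :: ys) = sep ++ (pvCatL sep t ++ (y ++ pvCatR sep ys)) := by
  induction t with
  | nil => simp [pvCatR, pvCatL, String.empty_append, String.append_assoc]
  | cons b t' ih => simp [pvCatR, pvCatL, ih, String.append_assoc]

theorem pvJoin_split (sep y : String) (xs ys : List String) :
    PySem.Str.join sep (xs ++ y :: ys) = pvCatL sep xs ++ (y ++ pvCatR sep ys) := by
  cases xs with
  | nil => simp [pvJoin_cons, pvCatL, String.empty_append]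
  | cons a t =>
      rw [List.cons_append, pvJoin_cons, pvCatR_append_cons]
      simp [pvCatL, String.append_assoc]

-- invariant of B's forward (prefix) accumulator loop
theorem pvFoldl_pref (sep : String) (xs prefs : List String) (acc : String) :
    xs.foldl (fun st p => (st.1 ++ [st.2 ++ p ++ sep], st.2 ++ p ++ sep)) (prefs, acc)
      = (prefs ++ (List.range xs.length).map (fun i => acc ++ pvCatL sep (xs.take (i + 1))),
         acc ++ pvCatL sep xs) := by
  induction xs generalizing prefs acc with
  | nil => simp [pvCatL, String.append_empty]
  | cons p r ih =>
      simp only [List.foldl_cons, ih, List.length_cons, List.range_succ_eq_map, List.map_cons,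
        List.map_map, Prod.mk.injEq]
      constructor
      · simp [pvCatL, String.append_assoc, String.append_empty, Function.comp]
      · simp [pvCatL, String.append_assoc]

-- invariant of B's backward (suffix) accumulator loop
theorem pvFoldl_suf (sep : String) (ys sufs : List String) (acc : String) :
    ys.foldl (fun st p => (st.1 ++ [sep ++ p ++ st.2], sep ++ p ++ st.2)) (sufs, acc)
      = (sufs ++ (List.range ys.length).map (fun i => pvCatR sep ((ys.take (i + 1)).reverse) ++ acc),
         pvCatR sep ys.reverse ++ acc) := by
  induction ys generalizing sufs acc with
  | nil => simp [pvCatR, String.empty_append]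
  | cons p r ih =>
      simp only [List.foldl_cons, ih, List.length_cons, List.range_succ_eq_map, List.map_cons,
        List.map_map, Prod.mk.injEq]
      constructor
      · simp [List.take_succ_cons, pvCatR_append_singleton, pvCatR, String.append_assoc,
          String.append_empty, Function.comp]
      · simp [pvCatR_append_singleton, String.append_assoc]

theorem pvPref_eq (sep : String) (pos : List String) :
    (pos.foldl (fun (st : List String × String) p =>
        (st.1 ++ [st.2 ++ p ++ sep], st.2 ++ p ++ sep)) ([""], "")).1
      = (List.range (pos.length + 1)).map (fun i => pvCatL sep (pos.take i)) := by
  rw [pvFoldl_pref, List.range_succ_eq_map]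
  simp [pvCatL, List.map_map, String.empty_append, Function.comp]

theorem pvSuf_eq (sep : String) (pos : List String) :
    ((pos.reverse.foldl (fun (st : List String × String) p =>
        (st.1 ++ [sep ++ p ++ st.2], sep ++ p ++ st.2)) ([""], "")).1).reverse
      = (List.range (pos.length + 1)).map (fun j => pvCatR sep (pos.drop j)) := by
  rw [pvFoldl_suf]
  have htake : ∀ i : Nat, ((pos.reverse.take (i + 1)).reverse : List String)
      = pos.drop (pos.length - (i + 1)) := by
    intro i
    rw [List.reverse_take, List.reverse_reverse, List.length_reverse]
  simp only [htake, String.append_empty, List.length_reverse]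
  rw [List.singleton_append, List.reverse_cons, List.range_succ, List.map_append]
  congr 1
  · apply List.ext_getElem
    · simp
    · intro k hk hk'
      have hkn : k < pos.length := by simpa using hk'
      rw [List.getElem_reverse]
      simp only [List.getElem_map, List.getElem_range, List.length_map, List.length_range]
      rw [show pos.length - 1 - k + 1 = pos.length - k from by omega,
          show pos.length - (pos.length - k) = k from by omega]
  · simp [pvCatR]

-- B's assemble equals head + osep-join of the n+1 canonical clauses + ")"
theorem pvAssemble_eq (head csep osep : String) (pos neg : List String) :
    pvAssemble head csep osep pos neg
      = head ++ PySem.Str.join osep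
          ((List.range (pos.length + 1)).map (fun k =>
            "(" ++ PySem.Str.join csep
              (if k = pos.length then neg else pos.set k (neg.getD k "")) ++ ")")) ++ ")" := by
  simp only [pvAssemble]
  congr 2
  rw [List.range_succ, List.map_append]
  congr 1
  apply List.ext_getElem
  · simp [PySem.List.length_pyRange_one]
  · intro k hk hk'
    have hklen : k < pos.length + 1 := by
      simpa [PySem.List.length_pyRange_one] using hk
    by_cases h : k < pos.length
    · rw [List.getElem_append_left (by simpa [PySem.List.length_pyRange_one] using h)]
      rw [List.getElem_append_left (by simpa using h)]
      simp only [List.getElem_map, PySem.List.getElem_pyRange_one, zero_add, List.getElem_range]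
      have h1 : PySem.List.pyGetD
          ((pos.foldl (fun (st : List String × String) p =>
            (st.1 ++ [st.2 ++ p ++ csep], st.2 ++ p ++ csep)) ([""], "")).1) (k : Int) ""
          = pvCatL csep (pos.take k) := by
        rw [pvPref_eq, PySem.List.pyGetD_natCast, PySem.List.getD_map_range _ _ _ _ (by omega)]
      have h2 : PySem.List.pyGetD
          (((pos.reverse.foldl (fun (st : List String × String) p =>
            (st.1 ++ [csep ++ p ++ st.2], csep ++ p ++ st.2)) ([""], "")).1).reverse)
            ((k : Int) + 1) ""
          = pvCatR csep (pos.drop (k + 1)) := by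
        have : ((k : Int) + 1) = ((k + 1 : Nat) : Int) := by push_cast; ring
        rw [this, pvSuf_eq, PySem.List.pyGetD_natCast, PySem.List.getD_map_range _ _ _ _ (by omega)]
      rw [h1, h2]
      have hne : ¬ (k = pos.length) := by omega
      rw [if_neg hne]
      rw [List.set_eq_take_cons_drop _ h, ← List.singleton_append, ← List.append_assoc]
      rw [show (pos.take k ++ [neg.getD k ""]) ++ pos.drop (k + 1)
            = pos.take k ++ neg.getD k "" :: pos.drop (k + 1) by simp]
      rw [pvJoin_split]
      have h3 : PySem.List.pyGetD neg (k : Int) "" = neg.getD k "" := by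
        rw [PySem.List.pyGetD_natCast]
      rw [h3]
      simp [String.append_assoc]
    · have hk2 : k = pos.length := by omega
      subst hk2
      rw [List.getElem_append_right (by simp [PySem.List.length_pyRange_one])]
      rw [List.getElem_append_right (by simp)]
      simp [PySem.List.length_pyRange_one]

-- A's enumerate/pySetD rows are the canonical "negate position k" rows
theorem pvRowsA_eq (L : List String) :
    (PySem.List.enumerate L).map (fun p => PySem.List.pySetD L p.1 ("not " ++ p.2))
      = (List.range L.length).map (fun k => L.set k ((L.map (fun p => "not " ++ p)).getD k "")) := by
  apply List.ext_getElem
  · simp [PySem.List.length_enumerate]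
  · intro k hk hk'
    have hkL : k < L.length := by simpa [PySem.List.length_enumerate] using hk
    simp only [List.getElem_map, List.getElem_range]
    rw [show (PySem.List.enumerate L)[k]'(by simpa [PySem.List.length_enumerate] using hkL)
        = ((0 : Int) + (k : Int), L[k]) from PySem.List.getElem_enumerate ..]
    simp [PySem.List.pySetD_natCast, hkL]

-- A's clause list (for one of the two strings) in canonical form
theorem pvClausesA_eq (L : List String) (clauseOf : List String → String) :
    (((PySem.List.enumerate L).foldl
        (fun acc p => acc ++ [PySem.List.pySetD L p.1 ("not " ++ p.2)]) [])
      ++ [L.map (fun x => "not " ++ x)]).map clauseOf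
      = (List.range (L.length + 1)).map (fun k =>
          clauseOf (if k = L.length then L.map (fun p => "not " ++ p)
                    else L.set k ((L.map (fun p => "not " ++ p)).getD k ""))) := by
  rw [PySem.List.foldl_append_singleton_eq_map, List.nil_append, pvRowsA_eq]
  rw [List.range_succ, List.map_append, List.map_append, List.map_map]
  congr 1
  · apply List.map_congr_left
    intro k hkmem
    have : k < L.length := List.mem_range.mp hkmem
    simp [Function.comp, Nat.ne_of_lt this]
  · simp
  
-- ===== VERDICT (by name: the statement is the Claim_ definition above) =====
theorem get_ltl_suggestion_spec : Claim_equal_get_ltl_suggestion := by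
  intro L _
  show get_ltl_suggestion L = get_ltl_suggestion_alt L
  simp only [get_ltl_suggestion, get_ltl_suggestion_alt, Prod.mk.injEq]
  constructor
  · -- structured english string
    rw [pvAssemble_eq]
    rw [pvClausesA_eq L (fun pl => "(" ++ PySem.Str.join " and " pl ++ ")")]
  · -- ltl string
    rw [pvAssemble_eq]
    rw [pvClausesA_eq L (fun pl => "(" ++ PySem.Str.join " & "
        (pl.map (fun prop => PySem.Str.replace prop "not" "!")) ++ ")")]
    simp only [List.length_map]
    congr 2
    congr 1
    apply List.map_congr_left
    intro k hkmem
    by_cases h : k = L.length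
    · simp [h, List.map_map]
    · have hkL : k < L.length := by
        have := List.mem_range.mp hkmem; omega
      rw [if_neg h, if_neg h]
      rw [List.map_set]
      simp [List.getD, List.getElem?_eq_getElem hkL, Function.comp]
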